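-- pv_equiv track=rewrite | github.com/cindybohyeon/Algorithm_Study | 2023/Simulation/1_프로그래머스_완전탐색.py | solution
-- ===== SOURCE A (Python) =====
-- def solution(answers):
--     pattern1 = [1,2,3,4,5]
--     pattern2 = [2,1,2,3,2,4,2,5]
--     pattern3 = [3,3,1,1,2,2,4,4,5,5]
--     score = [0, 0, 0]
--     result = []
--
--     for idx, answer in enumerate(answers):
--         if answer == pattern1[idx%len(pattern1)]:
--             score[0] += 1
--         if answer == pattern2[idx%len(pattern2)]:
--             score[1] += 1
--         if answer == pattern3[idx%len(pattern3)]: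
--             score[2] += 1
--
--     for idx, s in enumerate(score):
--         if s == max(score):
--             result.append(idx+1)
--
--     return result
-- ===== SOURCE B (Python) =====
-- def solution(answers):
--     patterns = [[1, 2, 3, 4, 5],
--                 [2, 1, 2, 3, 2, 4, 2, 5],
--                 [3, 3, 1, 1, 2, 2, 4, 4, 5, 5]]
--     n = len(answers)
--     scores = []
--     for p in patterns:
--         L = len(p)
--         s = 0
--         for r in range(L):
--             v = p[r]
--             for i in range(r, n, L):
--                 if answers[i] == v:
--                     s += 1
--         scores.append(s)
--     m = max(scores)
--     return [k + 1 for k, t in enumerate(scores) if t == m]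
-- ===== Notes on version B (the rewrite author's own statement) =====
-- stated objective: alternative
-- what changed: B counts by residue classes: for each pattern and each pattern position r it scans the arithmetic progression of indices r, r+L, r+2L, ... (range with step L) comparing those answers against the fixed value p[r], instead of A's single enumerate pass that compares each answer with pattern[idx % len] for all three patterns simultaneously; no modulo is computed.
import Mathlib
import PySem

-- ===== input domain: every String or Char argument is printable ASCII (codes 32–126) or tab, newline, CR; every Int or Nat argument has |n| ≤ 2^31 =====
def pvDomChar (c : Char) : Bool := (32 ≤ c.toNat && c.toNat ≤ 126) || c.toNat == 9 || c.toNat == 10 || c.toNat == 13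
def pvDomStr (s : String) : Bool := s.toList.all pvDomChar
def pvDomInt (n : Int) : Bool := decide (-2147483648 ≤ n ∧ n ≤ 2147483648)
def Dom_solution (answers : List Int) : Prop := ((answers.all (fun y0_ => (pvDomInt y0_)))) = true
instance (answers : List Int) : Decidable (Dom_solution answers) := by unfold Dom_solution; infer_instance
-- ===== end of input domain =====

-- B counts by residue classes: for each pattern position r it scans the arithmetic progression
-- of indices r, r+L, r+2L, … (range with step L) against the fixed value p[r], instead of A's
-- single enumerate pass comparing each answer with pattern[idx % len] for all three patterns.


-- ===== PORT A =====
-- One interleaved pass over enumerate(answers) updating the three counters of `score`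
-- (the three-element Python list `score` is carried as an Int triple); the pattern
-- lookups pattern[idx % len] are always in range, so pyGetD is exact here.
def solution (answers : List Int) : List Int :=
  let pattern1 : List Int := [1,2,3,4,5]
  let pattern2 : List Int := [2,1,2,3,2,4,2,5]
  let pattern3 : List Int := [3,3,1,1,2,2,4,4,5,5]
  let score : Int × Int × Int :=
    (PySem.List.enumerate answers 0).foldl
      (fun sc ia =>
        let sc0 := if ia.2 = PySem.List.pyGetD pattern1 (PySem.Int.mod ia.1 (pattern1.length : Int)) 0 then sc.1 + 1 else sc.1
        let sc1 := if ia.2 = PySem.List.pyGetD pattern2 (PySem.Int.mod ia.1 (pattern2.length : Int)) 0 then sc.2.1 + 1 else sc.2.1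
        let sc2 := if ia.2 = PySem.List.pyGetD pattern3 (PySem.Int.mod ia.1 (pattern3.length : Int)) 0 then sc.2.2 + 1 else sc.2.2
        (sc0, sc1, sc2))
      (0, 0, 0)
  let scoreL : List Int := [score.1, score.2.1, score.2.2]
  (PySem.List.enumerate scoreL 0).foldl
    (fun r ks =>
      if ks.2 = (PySem.List.max? scoreL (fun y => y)).getD 0 then r ++ [ks.1 + 1] else r)
    []

-- ===== PORT B =====
-- B: per pattern, per pattern position r, a strided scan 'for i in range(r, n, L)'
-- comparing answers[i] (always in range, so pyGetD is exact) with the fixed value p[r].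
def solution_alt (answers : List Int) : List Int :=
  let patterns : List (List Int) := [[1,2,3,4,5],[2,1,2,3,2,4,2,5],[3,3,1,1,2,2,4,4,5,5]]
  let n : Int := (answers.length : Int)
  let scores : List Int :=
    patterns.foldl (fun acc p =>
      let L : Int := (p.length : Int)
      let s : Int :=
        (PySem.List.pyRange 0 L 1).foldl (fun s r =>
          let v := PySem.List.pyGetD p r 0
          (PySem.List.pyRange r n L).foldl (fun s i =>
            if PySem.List.pyGetD answers i 0 = v then s + 1 else s) s) 0
      acc ++ [s]) []
  let m : Int := (PySem.List.max? scores (fun y => y)).getD 0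
  (PySem.List.enumerate scores 0).foldl
    (fun r ks => if ks.2 = m then r ++ [ks.1 + 1] else r)
    []

-- ===== PRECONDITION & SPEC =====
def Spec_solution (answers : List Int) (out : List Int) : Prop := out = solution_alt answers
instance (answers : List Int) (out : List Int) : Decidable (Spec_solution answers out) := by unfold Spec_solution; infer_instance

-- ===== CLAIM (what is proved, stated in full; the proofs are below) =====
def Claim_equal_solution : Prop := ∀ (answers : List Int), Dom_solution answers → Spec_solution answers (solution answers)

-- ===== LEMMAS AND PROOFS =====

-- A's triple-state fold is the triple of the three one-pattern folds.
theorem pvTriple (P1 P2 P3 : Int × Int → Prop) [DecidablePred P1] [DecidablePred P2]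
    [DecidablePred P3] (l : List (Int × Int)) (a b c : Int) :
    l.foldl
      (fun (sc : Int × Int × Int) ia =>
        ((if P1 ia then sc.1 + 1 else sc.1),
         (if P2 ia then sc.2.1 + 1 else sc.2.1),
         (if P3 ia then sc.2.2 + 1 else sc.2.2)))
      (a, b, c)
    = (l.foldl (fun s ia => if P1 ia then s + 1 else s) a,
       l.foldl (fun s ia => if P2 ia then s + 1 else s) b,
       l.foldl (fun s ia => if P3 ia then s + 1 else s) c) := by
  induction l generalizing a b c with
  | nil => rfl
  | cons x t ih => simp only [List.foldl_cons]; exact ih _ _ _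

-- A pyRange with positive step has no duplicate elements.
theorem pvNodupStride (a b s : ℤ) (hs : 0 < s) : (PySem.List.pyRange a b s).Nodup := by
  rw [PySem.List.pyRange_of_pos a b hs]
  refine List.Nodup.map ?_ (List.nodup_range)
  intro k1 k2 h
  have : (k1 : ℤ) = (k2 : ℤ) := by
    have := mul_left_cancel₀ (ne_of_gt hs) (by linarith : s * (k1 : ℤ) = s * (k2 : ℤ))
    exact this
  exact_mod_cast this

-- The residue classes of [0, n) modulo L, listed class by class, are a permutation of [0, n).
theorem pvPerm (n L : ℤ) (hL : 0 < L) :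
    (List.flatMap (fun r => PySem.List.pyRange r n L) (PySem.List.pyRange 0 L 1)).Perm
      (PySem.List.pyRange 0 n 1) := by
  refine (List.perm_ext_iff_of_nodup ?_ (PySem.List.nodup_pyRange_one 0 n)).mpr ?_
  · refine List.nodup_flatMap.mpr ⟨fun r _ => pvNodupStride r n L hL, ?_⟩
    have hpw := PySem.List.pairwise_lt_pyRange_one 0 L
    refine List.Pairwise.imp_of_mem ?_ hpw
    intro r1 r2 h1 h2 hlt x hx1 hx2
    have hb1 := PySem.List.mem_pyRange_one.mp h1
    have hb2 := PySem.List.mem_pyRange_one.mp h2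
    obtain ⟨_, _, hd1⟩ := (PySem.List.mem_pyRange_iff_of_pos hL x).mp hx1
    obtain ⟨_, _, hd2⟩ := (PySem.List.mem_pyRange_iff_of_pos hL x).mp hx2
    have hdvd : L ∣ r2 - r1 := by
      have := dvd_sub hd1 hd2
      simpa [sub_sub_sub_cancel_left] using this
    have := Int.le_of_dvd (by omega) hdvd
    omega
  · intro a
    rw [List.mem_flatMap, PySem.List.mem_pyRange_one]
    constructor
    · rintro ⟨r, hr, ha⟩
      have hrb := PySem.List.mem_pyRange_one.mp hr
      obtain ⟨h1, h2, _⟩ := (PySem.List.mem_pyRange_iff_of_pos hL a).mp ha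
      omega
    · rintro ⟨h0, hn⟩
      refine ⟨a % L, ?_, ?_⟩
      · rw [PySem.List.mem_pyRange_one]
        exact ⟨Int.emod_nonneg a (ne_of_gt hL), Int.emod_lt_of_pos a hL⟩
      · rw [PySem.List.mem_pyRange_iff_of_pos hL]
        have hle : a % L ≤ a := by
          rcases lt_or_ge a L with h | h
          · rw [Int.emod_eq_of_lt h0 h]
          · exact le_trans (le_of_lt (Int.emod_lt_of_pos a hL)) h
        refine ⟨hle, hn, ⟨a / L, ?_⟩⟩
        have h := Int.mul_ediv_add_emod a L
        linarith

-- On the residue class r of [0, n) mod L (0 ≤ r < L), Python's i % L is r.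
theorem pvModOnClass (n L r i : ℤ) (hL : 0 < L) (hr0 : 0 ≤ r) (hrL : r < L)
    (hi : i ∈ PySem.List.pyRange r n L) : PySem.Int.mod i L = r := by
  obtain ⟨h1, h2, k, hk⟩ := (PySem.List.mem_pyRange_iff_of_pos hL i).mp hi
  have hik : i = r + L * k := by linarith
  show Int.fmod i L = r
  have hfe : Int.fmod i L = i % L := by
    rw [Int.fmod_eq_emod]
    simp [le_of_lt hL]
  rw [hfe, hik, Int.add_mul_emod_self_left, Int.emod_eq_of_lt hr0 hrL]

-- B's residue-class double scan for one pattern equals A's single enumerate scan of that pattern.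
theorem pvScoreEq (p xs : List Int) (hp : 0 < p.length) :
    (PySem.List.pyRange 0 (p.length : Int) 1).foldl (fun s r =>
        (PySem.List.pyRange r (xs.length : Int) (p.length : Int)).foldl
          (fun s i => if PySem.List.pyGetD xs i 0 = PySem.List.pyGetD p r 0 then s + 1 else s) s) 0
    = (PySem.List.enumerate xs 0).foldl
        (fun (s : Int) ia =>
          if ia.2 = PySem.List.pyGetD p (PySem.Int.mod ia.1 (p.length : Int)) 0 then s + 1 else s) 0 := by
  have hL : (0 : ℤ) < (p.length : Int) := by exact_mod_cast hp
  -- the global comparison function, indexed by position only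
  set F : Int → Int → Int := fun s i =>
    if PySem.List.pyGetD xs i 0 = PySem.List.pyGetD p (PySem.Int.mod i (p.length : Int)) 0
    then s + 1 else s with hF
  -- right-hand side: enumerate as a map over range
  have hrhs : (PySem.List.enumerate xs 0).foldl
      (fun (s : Int) ia =>
        if ia.2 = PySem.List.pyGetD p (PySem.Int.mod ia.1 (p.length : Int)) 0 then s + 1 else s) 0
      = (PySem.List.pyRange 0 (xs.length : Int) 1).foldl F 0 := by
    rw [PySem.List.enumerate_eq_map_pyRange xs 0, List.foldl_map]
    rfl
  rw [hrhs]
  -- left-hand side: replace the inner comparison by F (i % L = r on the class of r)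
  have hlhs : (PySem.List.pyRange 0 (p.length : Int) 1).foldl (fun s r =>
      (PySem.List.pyRange r (xs.length : Int) (p.length : Int)).foldl
        (fun s i => if PySem.List.pyGetD xs i 0 = PySem.List.pyGetD p r 0 then s + 1 else s) s) 0
      = (PySem.List.pyRange 0 (p.length : Int) 1).foldl (fun s r =>
      (PySem.List.pyRange r (xs.length : Int) (p.length : Int)).foldl F s) 0 := by
    refine PySem.List.foldl_congr_mem _ _ _ _ ?_
    intro acc r hr
    obtain ⟨hr0, hrL⟩ := PySem.List.mem_pyRange_one.mp hr
    refine PySem.List.foldl_congr_mem _ _ _ _ ?_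
    intro s i hi
    rw [hF]
    simp only [pvModOnClass (xs.length : Int) (p.length : Int) r i hL hr0 hrL hi]
  rw [hlhs, ← List.foldl_flatMap]
  haveI : RightCommutative F := ⟨by
    intro b a1 a2
    rw [hF]
    dsimp only
    split_ifs <;> omega⟩
  exact (pvPerm (xs.length : Int) (p.length : Int) hL).foldl_eq 0

-- ===== VERDICT (by name: the statement is the Claim_ definition above) =====
theorem solution_spec : Claim_equal_solution := by
  intro answers _
  show solution answers = solution_alt answers
  unfold solution solution_alt
  simp only [List.foldl_cons, List.foldl_nil, List.nil_append,
    List.cons_append]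
  rw [pvTriple
       (fun ia => ia.2 = PySem.List.pyGetD [1,2,3,4,5] (PySem.Int.mod ia.1 ([1,2,3,4,5].length : Int)) 0)
       (fun ia => ia.2 = PySem.List.pyGetD [2,1,2,3,2,4,2,5] (PySem.Int.mod ia.1 ([2,1,2,3,2,4,2,5].length : Int)) 0)
       (fun ia => ia.2 = PySem.List.pyGetD [3,3,1,1,2,2,4,4,5,5] (PySem.Int.mod ia.1 ([3,3,1,1,2,2,4,4,5,5].length : Int)) 0)]
  rw [← pvScoreEq [1,2,3,4,5] answers (by decide),
      ← pvScoreEq [2,1,2,3,2,4,2,5] answers (by decide),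
      ← pvScoreEq [3,3,1,1,2,2,4,4,5,5] answers (by decide)]
  rfl
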